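-- pv_equiv track=rewrite | github.com/simoncpu/sdbot | limbo/plugins/common/basewrapper.py | find_name
-- ===== SOURCE A (Python) =====
-- def find_name(_id, services, devices):
--     for s in services:
--         if _id == s['_id']:
--             return s['name']
--     for d in devices:
--         if _id == d['_id']:
--             return d['name']
--     return 'No name'
-- ===== SOURCE B (Python) =====
-- def find_name(_id, services, devices):
--     if not services:
--         return find_name(_id, devices, []) if devices else 'No name'
--     rec = services[0]
--     return rec['name'] if _id == rec['_id'] else find_name(_id, services[1:], devices)
-- ===== Notes on version B (the rewrite author's own statement) =====
-- stated objective: alternative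
-- what changed: Replaces A's two sequential iterative search loops with a single loop-free recursive function that examines the head record and recurses on the tail, promoting devices into the scan position once services is exhausted; the lazy field-access order (and hence the first-match precedence and KeyError behaviour) is unchanged.
import Mathlib
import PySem

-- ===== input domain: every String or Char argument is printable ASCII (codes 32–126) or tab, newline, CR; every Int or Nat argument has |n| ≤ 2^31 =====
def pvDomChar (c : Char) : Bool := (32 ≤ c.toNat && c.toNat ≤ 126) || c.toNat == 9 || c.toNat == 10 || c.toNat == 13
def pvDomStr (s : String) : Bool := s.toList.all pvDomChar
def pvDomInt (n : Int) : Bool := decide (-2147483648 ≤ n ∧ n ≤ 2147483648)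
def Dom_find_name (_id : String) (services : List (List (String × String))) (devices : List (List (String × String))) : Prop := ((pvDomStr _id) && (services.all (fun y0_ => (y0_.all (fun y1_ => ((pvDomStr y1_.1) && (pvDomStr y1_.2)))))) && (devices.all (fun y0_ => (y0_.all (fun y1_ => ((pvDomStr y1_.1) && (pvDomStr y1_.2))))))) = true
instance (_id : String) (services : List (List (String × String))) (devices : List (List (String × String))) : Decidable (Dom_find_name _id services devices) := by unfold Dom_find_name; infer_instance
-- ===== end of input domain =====

-- B replaces A's two iterative search loops with one loop-free recursive function (head record, then
-- recurse on the tail; devices is promoted into scan position when services runs out); objective: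
-- alternative (same lazy access order and cost, a different decomposition).

-- ===== PORT A =====
-- dict lookup rec[k] on an insertion-order assoc list: first match; none = KeyError
def pyKey (rec : List (String × String)) (k : String) : Option String :=
  (rec.find? (fun p => p.1 == k)).map (·.2)

-- `for s in recs: if _id == s['_id']: return s['name']`; none = fell through (or a KeyError, excluded by Pre_)
def scanRecs (_id : String) : List (List (String × String)) → Option String
  | [] => none
  | s :: rest =>
      match pyKey s "_id" with
      | some v => if _id == v then pyKey s "name" else scanRecs _id rest
      | none => none

def find_name (_id : String) (services : List (List (String × String))) (devices : List (List (String × String))) : String :=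
  match scanRecs _id services with
  | some n => n
  | none =>
      match scanRecs _id devices with
      | some n => n
      | none => "No name"

-- ===== PORT B =====
-- Source B's recursion, step for step; a missing key is a KeyError in Python (unreachable inside Pre_),
-- here "" stands in for it
def find_name_alt (_id : String) (services : List (List (String × String))) (devices : List (List (String × String))) : String :=
  match services with
  | [] =>
      match devices with
      | [] => "No name"
      | d :: ds => find_name_alt _id (d :: ds) []
  | rec :: rest =>
      match pyKey rec "_id" with
      | some v => if _id == v then (pyKey rec "name").getD "" else find_name_alt _id rest devices
      | none => ""
termination_by (services.length + devices.length, devices.length)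
decreasing_by
  · simp only [List.length_cons, List.length_nil, Nat.add_zero, Nat.zero_add]
    exact Prod.Lex.right _ (by omega)
  · apply Prod.Lex.left
    simp only [List.length_cons]
    omega

-- ===== PRECONDITION & SPEC =====
-- A scans `recs` without a KeyError iff: every record strictly before the first one whose '_id' equals the
-- target carries an '_id' key, and the first matching record (if any) carries a 'name' key.
def scanOK (_id : String) (recs : List (List (String × String))) : Bool :=
  ((recs.takeWhile (fun s => pyKey s "_id" != some _id)).all (fun s => (pyKey s "_id").isSome))
  && (match recs.find? (fun s => pyKey s "_id" == some _id) with
      | some s => (pyKey s "name").isSome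
      | none => true)

-- Pre_ is exactly where A (and B, which reads the same fields in the same order) returns instead of raising
-- KeyError: the services scan is clean, and either it finds a match (A returns there, devices untouched) or
-- the devices scan is clean too.
def Pre_find_name (_id : String) (services : List (List (String × String))) (devices : List (List (String × String))) : Prop :=
  (scanOK _id services && (services.any (fun s => pyKey s "_id" == some _id) || scanOK _id devices)) = true

instance (_id : String) (services : List (List (String × String))) (devices : List (List (String × String))) : Decidable (Pre_find_name _id services devices) := by unfold Pre_find_name; infer_instance

def pvWitness_find_name : String × (List (List (String × String))) × (List (List (String × String))) :=
  ("a", [[("_id", "b"), ("name", "Svc")]], [[("_id", "a"), ("name", "Dev")]])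

def Spec_find_name (_id : String) (services : List (List (String × String))) (devices : List (List (String × String))) (out : String) : Prop := out = find_name_alt _id services devices
instance (_id : String) (services : List (List (String × String))) (devices : List (List (String × String))) (out : String) : Decidable (Spec_find_name _id services devices out) := by unfold Spec_find_name; infer_instance

-- ===== CLAIM =====
def Claim_equal_find_name : Prop := ∀ (_id : String) (services : List (List (String × String))) (devices : List (List (String × String))), Dom_find_name _id services devices → Pre_find_name _id services devices → Spec_find_name _id services devices (find_name _id services devices)

-- ===== LEMMAS AND PROOFS =====

-- step characterisation of the clean-scan condition
theorem scanOK_cons (x : String) (s : List (String × String)) (rest : List (List (String × String))) :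
    scanOK x (s :: rest) =
      (match pyKey s "_id" with
       | none => false
       | some v => if v == x then (pyKey s "name").isSome else scanOK x rest) := by
  cases hv : pyKey s "_id" with
  | none => simp [scanOK, hv]
  | some v =>
      by_cases hvx : v = x
      · subst hvx; simp [scanOK, hv]
      · have h1 : (v == x) = false := by simp [hvx]
        simp [scanOK, hv, h1, hvx]

-- under a clean scan of svc, B's recursion is A's scan of svc, falling through to the devices stage
theorem alt_eq_scan (x : String) (svc dev : List (List (String × String)))
    (h : scanOK x svc = true) :
    find_name_alt x svc dev =
      (match scanRecs x svc with
       | some n => n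
       | none => find_name_alt x dev []) := by
  induction svc with
  | nil => cases dev <;> simp [find_name_alt, scanRecs]
  | cons s rest ih =>
      rw [scanOK_cons] at h
      cases hv : pyKey s "_id" with
      | none => rw [hv] at h; simp at h
      | some v =>
          rw [hv] at h
          by_cases hvx : v = x
          · subst hvx
            simp only [beq_self_eq_true, if_true] at h
            obtain ⟨w, hw⟩ := Option.isSome_iff_exists.mp h
            simp [find_name_alt, scanRecs, hv, hw]
          · have h1 : (v == x) = false := by simp [hvx]
            have hxv : (x == v) = false := by simp; exact fun hc => hvx hc.symm
            simp only [h1] at h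
            simp only [find_name_alt, scanRecs, hv, hxv, Bool.false_eq_true, if_false]
            exact ih h

-- a clean scan returning none means no record matched
theorem scan_none_no_match (x : String) (recs : List (List (String × String)))
    (h : scanOK x recs = true) (hn : scanRecs x recs = none) :
    recs.any (fun s => pyKey s "_id" == some x) = false := by
  induction recs with
  | nil => simp
  | cons s rest ih =>
      rw [scanOK_cons] at h
      cases hv : pyKey s "_id" with
      | none => rw [hv] at h; simp at h
      | some v =>
          rw [hv] at h
          by_cases hvx : v = x
          · subst hvx
            simp only [beq_self_eq_true, if_true] at h
            simp [scanRecs, hv] at hn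
            rw [hn] at h; simp at h
          · have h1 : (v == x) = false := by simp [hvx]
            have hxv : (x == v) = false := by simp; exact fun hc => hvx hc.symm
            simp only [h1] at h
            have hn' : scanRecs x rest = none := by
              simpa [scanRecs, hv, hxv] using hn
            simp [List.any_cons, hv, h1, ih h hn']

theorem find_name_spec : Claim_equal_find_name := by
  intro _id services devices _hdom hpre
  unfold Pre_find_name at hpre
  simp only [Bool.and_eq_true, Bool.or_eq_true] at hpre
  obtain ⟨hs, hrest⟩ := hpre
  unfold Spec_find_name find_name
  rw [alt_eq_scan _id services devices hs]
  cases hscan : scanRecs _id services with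
  | some n => simp
  | none =>
      have hnomatch := scan_none_no_match _id services hs hscan
      have hd : scanOK _id devices = true := by
        rcases hrest with hm | hd
        · rw [hnomatch] at hm; exact absurd hm (by simp)
        · exact hd
      rw [alt_eq_scan _id devices [] hd]
      cases scanRecs _id devices <;> simp [find_name_alt]
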